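-- pv_equiv track=rewrite | github.com/napari/weather-report | src/napari_dashboard/big_querry_update.py | parse_distro
-- ===== SOURCE A (Python) =====
-- def parse_distro(distro: str):
--     """
--     Parse the distro string to get the name and version
--
--     Parameters
--     ----------
--     distro: str
--         The distro string to parse. For example:
--         Ubuntu22.04jammy
--
--     Returns
--     -------
--     Tuple[str, str]
--         The distro name and version
--     """
--     for i in range(len(distro)):
--         if distro[i].isdigit():
--             distro_name = distro[:i]
--             for j in range(i, len(distro)):
--                 if distro[j].isalpha():
--                     distro_version = distro[i:j]
--                     return distro_name, distro_version
--     else: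
--         raise ValueError("No version found in distro string")
-- ===== SOURCE B (Python) =====
-- def parse_distro(distro: str):
--     """Single linear pass: find the first digit (end of the name), then the
--     first alphabetic character after it (end of the version)."""
--     start = None
--     name = None
--     for i, c in enumerate(distro):
--         if start is None:
--             if c.isdigit():
--                 name = distro[:i]
--                 start = i
--         elif c.isalpha():
--             return name, distro[start:i]
--     raise ValueError("No version found in distro string")
-- ===== Notes on version B (the rewrite author's own statement) =====
-- stated objective: simpler
-- what changed: Replaces the nested index scans (an inner for-loop restarted at every digit) with one linear enumerate pass that records the first digit position and returns at the first following alphabetic character.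
import Mathlib
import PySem

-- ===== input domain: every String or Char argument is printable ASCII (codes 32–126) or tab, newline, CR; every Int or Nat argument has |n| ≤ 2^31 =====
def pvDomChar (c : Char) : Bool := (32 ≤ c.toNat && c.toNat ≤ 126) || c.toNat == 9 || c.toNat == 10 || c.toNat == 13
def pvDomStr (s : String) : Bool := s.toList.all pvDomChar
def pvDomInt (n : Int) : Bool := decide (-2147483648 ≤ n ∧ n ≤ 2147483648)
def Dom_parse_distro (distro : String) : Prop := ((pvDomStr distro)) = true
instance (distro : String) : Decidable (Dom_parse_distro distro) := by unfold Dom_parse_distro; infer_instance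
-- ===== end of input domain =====

-- B replaces A's nested index scans by one linear pass with a state accumulator (simpler, one traversal);
-- on inputs where the Python raises ValueError (excluded by Pre_) both ports return ("", "").

-- ===== PORT A =====
-- inner loop: for j in range(i, len(distro)): if distro[j].isalpha(): return (distro[:i], distro[i:j])
-- (rest is the suffix of characters from position j, i.e. distro[j:], walked with its index)
def pvAInner (s : List Char) (i : Nat) (rest : List Char) (j : Nat) : Option (String × String) :=
  match rest with
  | [] => none
  | c :: cs =>
    if PySem.Chars.isalpha c then
      some (String.mk (s.take i), String.mk ((s.take j).drop i))
    else pvAInner s i cs (j + 1)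

-- outer loop: for i in range(len(distro)): if distro[i].isdigit(): <inner loop from i>
def pvAOuter (s : List Char) (rest : List Char) (i : Nat) : Option (String × String) :=
  match rest with
  | [] => none
  | c :: cs =>
    if PySem.Chars.isdigit c then
      match pvAInner s i (s.drop i) i with
      | some r => some r
      | none => pvAOuter s cs (i + 1)
    else pvAOuter s cs (i + 1)

def parse_distro (distro : String) : String × String :=
  (pvAOuter distro.toList distro.toList 0).getD ("", "")

-- ===== PORT B =====
-- single pass with an accumulator: none before the first digit, afterwards (start, name)
def pvBLoop (s : List Char) (rest : List Char) (i : Nat) (acc : Option (Nat × List Char)) :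
    Option (String × String) :=
  match rest with
  | [] => none
  | c :: cs =>
    match acc with
    | none =>
      if PySem.Chars.isdigit c then pvBLoop s cs (i + 1) (some (i, s.take i))
      else pvBLoop s cs (i + 1) none
    | some (st, nm) =>
      if PySem.Chars.isalpha c then some (String.mk nm, String.mk ((s.take i).drop st))
      else pvBLoop s cs (i + 1) (some (st, nm))

def parse_distro_alt (distro : String) : String × String :=
  (pvBLoop distro.toList distro.toList 0 none).getD ("", "")

-- ===== PRECONDITION & SPEC =====
-- Pre_ excludes exactly the inputs on which Python A raises ValueError: strings with no
-- digit, or with no alphabetic character after the first digit.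
def Pre_parse_distro (distro : String) : Prop :=
  ((distro.toList.dropWhile (fun c => !PySem.Chars.isdigit c)).any
    (fun c => PySem.Chars.isalpha c)) = true
instance (distro : String) : Decidable (Pre_parse_distro distro) := by
  unfold Pre_parse_distro; infer_instance
def pvWitness_parse_distro : String := "a1b"

def Spec_parse_distro (distro : String) (out : String × String) : Prop := out = parse_distro_alt distro
instance (distro : String) (out : String × String) : Decidable (Spec_parse_distro distro out) := by unfold Spec_parse_distro; infer_instance

-- ===== CLAIM (what is proved, stated in full; the proofs are below) =====
def Claim_equal_parse_distro : Prop := ∀ (distro : String), Dom_parse_distro distro → Pre_parse_distro distro → Spec_parse_distro distro (parse_distro distro)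

-- ===== LEMMAS AND PROOFS =====

lemma pv_digit_not_alpha (c : Char) (h : PySem.Chars.isdigit c = true) :
    PySem.Chars.isalpha c = false := by
  simp [PySem.Chars.isdigit, Char.le_def, UInt32.le_iff_toNat_le] at h
  simp [PySem.Chars.isalpha, PySem.Chars.isupper, PySem.Chars.islower, Char.le_def,
    UInt32.le_iff_toNat_le]
  omega

lemma pv_drop_cons {s : List Char} {i : Nat} {c : Char} {cs : List Char}
    (h : s.drop i = c :: cs) : s.drop (i + 1) = cs := by
  have : (s.drop i).drop 1 = s.drop (i + 1) := by rw [List.drop_drop]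
  rw [← this, h]; simp

-- A's inner scan equals B's scan in the "name found" state.
lemma pv_inner_eq (s : List Char) (i : Nat) (d : List Char) :
    ∀ (j : Nat), pvAInner s i d j = pvBLoop s d j (some (i, s.take i)) := by
  induction d with
  | nil => intro j; simp [pvAInner, pvBLoop]
  | cons c cs ih =>
    intro j
    by_cases ha : PySem.Chars.isalpha c
    · simp [pvAInner, pvBLoop, ha]
    · simp [pvAInner, pvBLoop, ha, ih (j + 1)]

-- if B's scan in the "name found" state fails, the rest holds no alphabetic char
lemma pv_bloop_none_noalpha (s : List Char) (d : List Char) :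
    ∀ (i : Nat) (p : Nat × List Char), pvBLoop s d i (some p) = none →
      ∀ c ∈ d, PySem.Chars.isalpha c = false := by
  induction d with
  | nil => intro i p _ c hc; simp at hc
  | cons c cs ih =>
    intro i p h c' hc'
    obtain ⟨st, nm⟩ := p
    by_cases ha : PySem.Chars.isalpha c
    · simp [pvBLoop, ha] at h
    · simp only [pvBLoop, ha, Bool.false_eq_true, if_neg, not_false_eq_true] at h
      rcases List.mem_cons.mp hc' with rfl | hmem
      · simpa using ha
      · exact ih (i + 1) (st, nm) h c' hmem

lemma pv_inner_none (s : List Char) (i : Nat) (d : List Char) :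
    ∀ (j : Nat), (∀ c ∈ d, PySem.Chars.isalpha c = false) → pvAInner s i d j = none := by
  induction d with
  | nil => intro j _; simp [pvAInner]
  | cons c cs ih =>
    intro j hna
    have hc : PySem.Chars.isalpha c = false := hna c List.mem_cons_self
    simp only [pvAInner, hc, Bool.false_eq_true, if_neg, not_false_eq_true]
    exact ih (j + 1) (fun c' hc' => hna c' (List.mem_cons_of_mem _ hc'))

lemma pv_outer_none (s : List Char) (d : List Char) :
    ∀ (i : Nat), d = s.drop i → (∀ c ∈ d, PySem.Chars.isalpha c = false) →
      pvAOuter s d i = none := by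
  induction d with
  | nil => intro i _ _; simp [pvAOuter]
  | cons c cs ih =>
    intro i hd hna
    have hinner : pvAInner s i (s.drop i) i = none :=
      pv_inner_none s i (s.drop i) i (by rw [← hd]; exact hna)
    have hrec : pvAOuter s cs (i + 1) = none :=
      ih (i + 1) (pv_drop_cons hd.symm).symm
        (fun c' hc' => hna c' (List.mem_cons_of_mem _ hc'))
    by_cases hdg : PySem.Chars.isdigit c
    · simp [pvAOuter, hdg, hinner, hrec]
    · simp [pvAOuter, hdg, hrec]

-- main bridge: A's outer loop on a suffix equals B's loop on the same suffix
lemma pv_main (s : List Char) (d : List Char) :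
    ∀ (i : Nat), d = s.drop i → pvAOuter s d i = pvBLoop s d i none := by
  induction d with
  | nil => intro i _; simp [pvAOuter, pvBLoop]
  | cons c cs ih =>
    intro i hd
    by_cases hdg : PySem.Chars.isdigit c
    · simp only [pvAOuter, pvBLoop, hdg, if_pos]
      have hinner : pvAInner s i (s.drop i) i = pvBLoop s cs (i + 1) (some (i, s.take i)) := by
        rw [pv_inner_eq s i (s.drop i) i, ← hd]
        simp [pvBLoop, pv_digit_not_alpha c hdg]
      rw [hinner]
      cases hres : pvBLoop s cs (i + 1) (some (i, s.take i)) with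
      | some r => simp
      | none =>
        simp only
        exact pv_outer_none s cs (i + 1) (pv_drop_cons hd.symm).symm
          (pv_bloop_none_noalpha s cs (i + 1) (i, s.take i) hres)
    · simp only [pvAOuter, pvBLoop, hdg, Bool.false_eq_true, if_neg, not_false_eq_true]
      exact ih (i + 1) (pv_drop_cons hd.symm).symm

-- ===== VERDICT (by name: the statement is the Claim_ definition above) =====
theorem parse_distro_spec : Claim_equal_parse_distro := by
  intro distro _ _
  unfold Spec_parse_distro parse_distro parse_distro_alt
  rw [pv_main distro.toList distro.toList 0 (by simp)]
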